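-- pv_equiv track=rewrite | github.com/sun-hainan/Python | 参数算法/k_path.py | exhaustive_k_path
-- ===== SOURCE A (Python) =====
-- def exhaustive_k_path(graph, k):
--     """
--     暴力枚举验证（用于对比，指数复杂度）。
--     """
--     vertices = list(graph.keys())
--
--     def dfs(path, visited):
--         if len(path) - 1 == k:
--             return True
--         last = path[-1]
--         for neighbor in graph.get(last, []):
--             if neighbor not in visited:
--                 visited.add(neighbor)
--                 path.append(neighbor)
--                 if dfs(path, visited):
--                     return True
--                 path.pop()
--                 visited.remove(neighbor)
--         return False
--
--     for start in vertices:
--         visited = {start}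
--         if dfs([start], visited):
--             return True
--     return False
-- ===== SOURCE B (Python) =====
-- def exhaustive_k_path(graph, k):
--     """Layered set DP over (visited-vertex-set, last-vertex) states instead of backtracking DFS."""
--     if k < 0:
--         return False
--     states = {((v,), v) for v in graph}
--     for _ in range(k):
--         if not states:
--             return False
--         states = {(tuple(sorted(vis + (nb,))), nb)
--                   for vis, last in states
--                   for nb in graph.get(last, [])
--                   if nb not in vis}
--     return bool(states)
-- ===== Notes on version B (the rewrite author's own statement) =====
-- stated objective: alternative
-- what changed: Replaces the backtracking DFS over explicit paths by a layered breadth-first dynamic program over deduplicated (visited-set, last-vertex) states, advancing k rounds and testing non-emptiness.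
import Mathlib
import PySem

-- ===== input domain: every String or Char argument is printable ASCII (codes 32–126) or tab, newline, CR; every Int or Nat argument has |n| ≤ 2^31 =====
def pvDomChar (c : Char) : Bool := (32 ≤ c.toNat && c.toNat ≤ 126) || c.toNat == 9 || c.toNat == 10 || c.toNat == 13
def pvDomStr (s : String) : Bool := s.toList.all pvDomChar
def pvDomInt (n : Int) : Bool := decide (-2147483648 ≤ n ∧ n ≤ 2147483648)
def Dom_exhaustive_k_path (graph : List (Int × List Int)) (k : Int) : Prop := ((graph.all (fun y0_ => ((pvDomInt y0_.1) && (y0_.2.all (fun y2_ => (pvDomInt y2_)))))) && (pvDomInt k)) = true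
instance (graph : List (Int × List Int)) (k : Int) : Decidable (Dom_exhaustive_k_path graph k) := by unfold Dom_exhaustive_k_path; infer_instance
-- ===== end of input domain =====

-- B replaces A's backtracking DFS by a layered set-DP over (visited-set, last-vertex) states (objective: alternative).

-- ===== PORT A =====
-- both Pythons receive `graph` as a dict; its Lean value is the association list, modelled by PySem.Dict.ofList
def pvKeys (graph : List (Int × List Int)) : List Int := (PySem.Dict.ofList graph).keys

-- graph.get(v, [])
def pvAdj (graph : List (Int × List Int)) (v : Int) : List Int := (PySem.Dict.ofList graph).getD v []

-- all vertices mentioned in the graph (termination measure only, not part of either Python)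
def pvUniv (graph : List (Int × List Int)) : List Int :=
  pvKeys graph ++ ((PySem.Dict.ofList graph).values).flatten

theorem pvAdj_subset_univ (graph : List (Int × List Int)) (v : Int) :
    ∀ x ∈ pvAdj graph v, x ∈ pvUniv graph := by
  intro x hx
  unfold pvAdj at hx
  rw [PySem.Dict.getD_eq_get?_getD] at hx
  cases hget : (PySem.Dict.ofList graph).get? v with
  | none => rw [hget] at hx; simp at hx
  | some l =>
    rw [hget] at hx
    have hmem := PySem.Dict.mem_items_of_get?_eq_some _ hget
    unfold pvUniv
    refine List.mem_append_right _ ?_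
    rw [List.mem_flatten]
    refine ⟨l, ?_, hx⟩
    simpa [PySem.Dict.values] using List.mem_map_of_mem (f := Prod.snd) hmem

theorem pvMeasure_lt (univ : List Int) (s : PySem.Set Int) (x : Int)
    (hx : x ∈ univ) (hs : PySem.Set.contains s x = false) :
    (univ.filter (fun v => !(PySem.Set.contains (PySem.Set.add s x) v))).length <
      (univ.filter (fun v => !(PySem.Set.contains s v))).length := by
  have hsub : (univ.filter (fun v => !(PySem.Set.contains (PySem.Set.add s x) v))).Sublist
      (univ.filter (fun v => !(PySem.Set.contains s v))) := by
    refine List.monotone_filter_right univ ?_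
    intro a ha
    simp only [Bool.not_eq_eq_eq_not, Bool.not_true, Bool.not_eq_true'] at *
    rw [← Bool.not_eq_true, PySem.Set.contains_iff] at *
    rw [PySem.Set.mem_add] at ha
    tauto
  rcases hsub.length_le.lt_or_eq with h | h
  · exact h
  · exfalso
    have heq := hsub.eq_of_length h
    have hx1 : x ∈ univ.filter (fun v => !(PySem.Set.contains s v)) := by
      rw [List.mem_filter]
      refine ⟨hx, ?_⟩
      rw [Bool.not_eq_true', hs]
    rw [← heq, List.mem_filter] at hx1
    have := hx1.2
    simp only [Bool.not_eq_true', ← Bool.not_eq_true, PySem.Set.contains_iff] at this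
    exact this (by rw [PySem.Set.mem_add]; right; rfl)

-- the inner recursive dfs of A; `path[-1]` is PySem.List.pyGetD path (-1) 0 (path is never empty at a call site)
def dfsA (graph : List (Int × List Int)) (k : Int) (path : List Int) (visited : PySem.Set Int) : Bool :=
  if (path.length : Int) - 1 = k then true
  else
    (pvAdj graph (PySem.List.pyGetD path (-1) 0)).attach.any (fun nb =>
      if h : PySem.Set.contains visited nb.1 = false then
        dfsA graph k (path ++ [nb.1]) (PySem.Set.add visited nb.1)
      else false)
termination_by ((pvUniv graph).filter (fun v => !(PySem.Set.contains visited v))).length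
decreasing_by
  exact pvMeasure_lt _ _ _ (pvAdj_subset_univ _ _ _ nb.2) h

def exhaustive_k_path (graph : List (Int × List Int)) (k : Int) : Bool :=
  (pvKeys graph).any (fun start => dfsA graph k [start] (PySem.Set.ofList [start]))

-- ===== PORT B =====
-- one round of B's comprehension; the result is a set, consumed only through emptiness
def pvStepB (graph : List (Int × List Int)) (states : List (List Int × Int)) : List (List Int × Int) :=
  PySem.Set.ofList (states.flatMap (fun st =>
    ((pvAdj graph st.2).filter (fun nb => !(PySem.Set.contains st.1 nb))).map
      (fun nb => (PySem.List.sorted (st.1 ++ [nb]) (fun x => x) false, nb))))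

def pvLoopB (graph : List (Int × List Int)) (states : List (List Int × Int)) : Nat → Bool
  | 0 => !states.isEmpty
  | j + 1 => if states.isEmpty then false else pvLoopB graph (pvStepB graph states) j

def exhaustive_k_path_alt (graph : List (Int × List Int)) (k : Int) : Bool :=
  if k < 0 then false
  else pvLoopB graph (PySem.Set.ofList ((pvKeys graph).map (fun v => ([v], v)))) k.toNat

-- ===== PRECONDITION & SPEC =====
def Spec_exhaustive_k_path (graph : List (Int × List Int)) (k : Int) (out : Bool) : Prop := out = exhaustive_k_path_alt graph k
instance (graph : List (Int × List Int)) (k : Int) (out : Bool) : Decidable (Spec_exhaustive_k_path graph k out) := by unfold Spec_exhaustive_k_path; infer_instance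

-- ===== CLAIM (what is proved, stated in full; the proofs are below) =====
def Claim_equal_exhaustive_k_path : Prop := ∀ (graph : List (Int × List Int)) (k : Int), Dom_exhaustive_k_path graph k → Spec_exhaustive_k_path graph k (exhaustive_k_path graph k)

-- ===== LEMMAS AND PROOFS =====

-- a simple path with n edges, starting at a key of the graph
def SpecP (graph : List (Int × List Int)) (n : Nat) : Prop :=
  ∃ s p, s ∈ pvKeys graph ∧ List.IsChain (fun a b => b ∈ pvAdj graph a) (s :: p) ∧
    (s :: p).Nodup ∧ p.length = n

theorem dfsA_eq_true_iff (graph : List (Int × List Int)) (k : Int) (p : List Int)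
    (hne : p ≠ []) (hnd : p.Nodup) (hch : List.IsChain (fun a b => b ∈ pvAdj graph a) p) :
    dfsA graph k p p = true ↔
      ∃ q, List.IsChain (fun a b => b ∈ pvAdj graph a) (p ++ q) ∧ (p ++ q).Nodup ∧
        (p.length : Int) + q.length - 1 = k := by
  generalize hm : ((pvUniv graph).filter (fun v => !(PySem.Set.contains p v))).length = m
  induction m using Nat.strong_induction_on generalizing p with
  | _ m IH =>
    have hlast : PySem.List.pyGetD p (-1) 0 = p.getLast hne := PySem.List.pyGetD_neg_one p 0 hne
    rw [dfsA]
    split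
    · rename_i hk
      constructor
      · intro _
        exact ⟨[], by simpa using hch, by simpa using hnd, by simpa using hk⟩
      · intro _; rfl
    · rename_i hk
      rw [List.any_eq_true]
      constructor
      · rintro ⟨⟨nb, hnbmem⟩, -, hbody⟩
        simp only at hbody
        split at hbody
        · rename_i hcont
          have hadd : PySem.Set.add p nb = p ++ [nb] := by
            simp only [PySem.Set.add, hcont]
            simp
          rw [hadd] at hbody
          have hnbnot : nb ∉ p := by
            intro hmem
            have hc := (PySem.Set.contains_iff p nb).mpr hmem
            rw [hcont] at hc
            exact absurd hc (by simp)
          have hnbadj : nb ∈ pvAdj graph (p.getLast hne) := by rwa [hlast] at hnbmem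
          have hch' : List.IsChain (fun a b => b ∈ pvAdj graph a) (p ++ [nb]) := by
            rw [List.isChain_append]
            refine ⟨hch, by simp, ?_⟩
            intro x hx y hy
            simp only [List.head?_cons, Option.mem_def, Option.some.injEq] at hy
            rw [List.getLast?_eq_some_getLast hne, Option.mem_def, Option.some.injEq] at hx
            subst hx; subst hy; exact hnbadj
          have hnd' : (p ++ [nb]).Nodup := by
            rw [List.nodup_append]
            refine ⟨hnd, by simp, ?_⟩
            intro a ha b hb
            simp only [List.mem_singleton] at hb
            subst hb
            exact fun h => hnbnot (h ▸ ha)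
          have hmlt : ((pvUniv graph).filter
              (fun v => !(PySem.Set.contains (p ++ [nb]) v))).length < m := by
            rw [← hm, ← hadd]
            exact pvMeasure_lt _ _ _ (pvAdj_subset_univ _ _ _ hnbmem) hcont
          obtain ⟨q', hq1, hq2, hq3⟩ :=
            (IH _ hmlt (p ++ [nb]) (by simp) hnd' hch' rfl).mp hbody
          refine ⟨nb :: q', ?_, ?_, ?_⟩
          · rwa [← List.append_cons] at hq1
          · rwa [← List.append_cons] at hq2
          · simp only [List.length_append, List.length_cons, List.length_nil] at hq3 ⊢
            push_cast at hq3 ⊢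
            omega
        · exact absurd hbody (by simp)
      · rintro ⟨q, hchq, hndq, hlen⟩
        match q with
        | [] =>
          exfalso
          simp at hlen
          exact hk (by omega)
        | nb :: q' =>
          have hnbnot : nb ∉ p := by
            intro hmemp
            exact (List.nodup_append.mp hndq).2.2 nb hmemp nb (by simp) rfl
          have hnbadj : nb ∈ pvAdj graph (p.getLast hne) := by
            rw [List.isChain_append] at hchq
            exact hchq.2.2 _ (by rw [List.getLast?_eq_some_getLast hne]; rfl) _ rfl
          have hcont : PySem.Set.contains p nb = false := by
            rw [Bool.eq_false_iff]
            intro hc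
            exact hnbnot ((PySem.Set.contains_iff _ _).mp hc)
          have hnbmem' : nb ∈ pvAdj graph (PySem.List.pyGetD p (-1) 0) := by
            rw [hlast]; exact hnbadj
          refine ⟨⟨nb, hnbmem'⟩, List.mem_attach _ _, ?_⟩
          simp only
          rw [dif_pos hcont]
          have hadd : PySem.Set.add p nb = p ++ [nb] := by
            simp only [PySem.Set.add, hcont]
            simp
          rw [hadd]
          have hch' : List.IsChain (fun a b => b ∈ pvAdj graph a) (p ++ [nb]) :=
            hchq.prefix ⟨q', (List.append_cons p nb q').symm⟩
          have hndq2 := hndq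
          rw [List.append_cons] at hndq2
          have hnd' : (p ++ [nb]).Nodup := hndq2.sublist (List.sublist_append_left _ _)
          have hmlt : ((pvUniv graph).filter
              (fun v => !(PySem.Set.contains (p ++ [nb]) v))).length < m := by
            rw [← hm, ← hadd]
            exact pvMeasure_lt _ _ _ (pvAdj_subset_univ _ _ _ hnbmem') hcont
          refine (IH _ hmlt (p ++ [nb]) (by simp) hnd' hch' rfl).mpr ⟨q', ?_, ?_, ?_⟩
          · rwa [List.append_cons] at hchq
          · exact hndq2
          · simp only [List.length_append, List.length_cons, List.length_nil] at hlen ⊢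
            push_cast at hlen ⊢
            omega

theorem A_iff (graph : List (Int × List Int)) (k : Int) :
    exhaustive_k_path graph k = true ↔ 0 ≤ k ∧ SpecP graph k.toNat := by
  unfold exhaustive_k_path
  rw [List.any_eq_true]
  constructor
  · rintro ⟨s, hs, hd⟩
    rw [PySem.Set.ofList_eq_self_of_nodup (xs := [s]) (by simp)] at hd
    obtain ⟨q, h1, h2, h3⟩ :=
      (dfsA_eq_true_iff graph k [s] (by simp) (by simp) (by simp)).mp hd
    simp only [List.cons_append, List.nil_append] at h1 h2
    simp only [List.length_cons, List.length_nil] at h3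
    refine ⟨by omega, s, q, hs, h1, h2, by omega⟩
  · rintro ⟨hk, s, q, hs, h1, h2, h3⟩
    refine ⟨s, hs, ?_⟩
    rw [PySem.Set.ofList_eq_self_of_nodup (xs := [s]) (by simp)]
    refine (dfsA_eq_true_iff graph k [s] (by simp) (by simp) (by simp)).mpr
      ⟨q, by simpa using h1, by simpa using h2, ?_⟩
    simp only [List.length_cons, List.length_nil]
    omega

def SoundB (graph : List (Int × List Int)) (n : Nat) (states : List (List Int × Int)) : Prop :=
  ∀ st ∈ states, ∃ s p, s ∈ pvKeys graph ∧
    List.IsChain (fun a b => b ∈ pvAdj graph a) (s :: p) ∧ (s :: p).Nodup ∧ p.length = n ∧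
    st.2 = (s :: p).getLast (by simp) ∧ (∀ x, x ∈ st.1 ↔ x ∈ s :: p)

def ComplB (graph : List (Int × List Int)) (n : Nat) (states : List (List Int × Int)) : Prop :=
  ∀ s p, s ∈ pvKeys graph →
    List.IsChain (fun a b => b ∈ pvAdj graph a) (s :: p) → (s :: p).Nodup → p.length = n →
    ∃ st ∈ states, st.2 = (s :: p).getLast (by simp) ∧ (∀ x, x ∈ st.1 ↔ x ∈ s :: p)

theorem stepB_sound (graph : List (Int × List Int)) (n : Nat) (states : List (List Int × Int))
    (hs : SoundB graph n states) : SoundB graph (n + 1) (pvStepB graph states) := by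
  intro st hst
  unfold pvStepB at hst
  rw [PySem.Set.mem_ofList, List.mem_flatMap] at hst
  obtain ⟨st0, hst0, hmem⟩ := hst
  rw [List.mem_map] at hmem
  obtain ⟨nb, hnb, hsteq⟩ := hmem
  rw [List.mem_filter] at hnb
  obtain ⟨hnbadj, hnbnew⟩ := hnb
  obtain ⟨s, p, hsk, hch, hnd, hlen, hlast, hmm⟩ := hs st0 hst0
  have hnb1 : nb ∉ st0.1 := by
    intro hx
    rw [(PySem.Set.contains_iff _ _).mpr hx] at hnbnew
    exact absurd hnbnew (by simp)
  have hnbnot : nb ∉ s :: p := fun hmem => hnb1 ((hmm nb).mpr hmem)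
  refine ⟨s, p ++ [nb], hsk, ?_, ?_, by simp [hlen], ?_, ?_⟩
  · rw [← List.cons_append, List.isChain_append]
    refine ⟨hch, by simp, ?_⟩
    intro x hx y hy
    simp only [List.head?_cons, Option.mem_def, Option.some.injEq] at hy
    rw [List.getLast?_eq_some_getLast (by simp), Option.mem_def, Option.some.injEq] at hx
    subst hx; subst hy
    rw [← hlast]
    exact hnbadj
  · rw [← List.cons_append, List.nodup_append]
    refine ⟨hnd, by simp, ?_⟩
    intro a ha b hb
    simp only [List.mem_singleton] at hb
    subst hb
    exact fun h => hnbnot (h ▸ ha)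
  · rw [← hsteq]
    simp [List.getLast_concat]
  · intro x
    rw [← hsteq]
    simp only [PySem.List.mem_sorted, List.mem_append]
    rw [hmm x]
    simp [List.mem_cons]
    tauto

theorem stepB_compl (graph : List (Int × List Int)) (n : Nat) (states : List (List Int × Int))
    (hc : ComplB graph n states) : ComplB graph (n + 1) (pvStepB graph states) := by
  intro s p hsk hch hnd hlen
  rcases List.eq_nil_or_concat p with rfl | ⟨q, nb, rfl⟩
  · simp at hlen
  rw [List.concat_eq_append] at hch hnd hlen ⊢
  have hpre : (s :: q) <+: s :: (q ++ [nb]) := ⟨[nb], by simp⟩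
  obtain ⟨st0, hst0, hlast0, hmm0⟩ := hc s q hsk (hch.prefix hpre) (hnd.sublist hpre.sublist)
    (by simpa using hlen)
  have hnbadj : nb ∈ pvAdj graph st0.2 := by
    rw [hlast0]
    rw [← List.cons_append, List.isChain_append] at hch
    exact hch.2.2 _ (by rw [List.getLast?_eq_some_getLast (by simp)]; rfl) _ rfl
  have hnbnot : nb ∉ s :: q := by
    rw [← List.cons_append, List.nodup_append] at hnd
    intro hmem
    exact hnd.2.2 nb hmem nb (by simp) rfl
  have hnbnew : PySem.Set.contains st0.1 nb = false := by
    rw [Bool.eq_false_iff]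
    intro hcb
    exact hnbnot ((hmm0 nb).mp ((PySem.Set.contains_iff _ _).mp hcb))
  refine ⟨(PySem.List.sorted (st0.1 ++ [nb]) (fun x => x) false, nb), ?_, ?_, ?_⟩
  · unfold pvStepB
    rw [PySem.Set.mem_ofList, List.mem_flatMap]
    refine ⟨st0, hst0, ?_⟩
    rw [List.mem_map]
    refine ⟨nb, ?_, rfl⟩
    rw [List.mem_filter]
    exact ⟨hnbadj, by rw [hnbnew]; rfl⟩
  · show nb = _
    have h8 : (s :: (q ++ [nb])).getLast? = some nb := by
      rw [← List.cons_append]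
      exact List.getLast?_concat
    have h9 := List.getLast?_eq_some_getLast (l := s :: (q ++ [nb])) (by simp)
    rw [h8] at h9
    exact Option.some_inj.mp h9
  · intro x
    simp only [PySem.List.mem_sorted, List.mem_append, List.mem_singleton]
    rw [hmm0 x]
    simp [List.mem_cons]
    tauto

theorem SpecP_down (graph : List (Int × List Int)) (n : Nat) (h : SpecP graph (n + 1)) :
    SpecP graph n := by
  obtain ⟨s, p, hsk, hch, hnd, hlen⟩ := h
  rcases List.eq_nil_or_concat p with rfl | ⟨q, nb, rfl⟩
  · simp at hlen
  rw [List.concat_eq_append] at hch hnd hlen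
  have hpre : (s :: q) <+: s :: (q ++ [nb]) := ⟨[nb], by simp⟩
  exact ⟨s, q, hsk, hch.prefix hpre, hnd.sublist hpre.sublist, by simpa using hlen⟩

theorem SpecP_add_down (graph : List (Int × List Int)) (n j : Nat)
    (h : SpecP graph (n + j)) : SpecP graph n := by
  induction j with
  | zero => simpa using h
  | succ i IH => exact IH (SpecP_down graph (n + i) h)

theorem loopB_iff (graph : List (Int × List Int)) (j : Nat) :
    ∀ (n : Nat) (states : List (List Int × Int)), SoundB graph n states → ComplB graph n states →
      (pvLoopB graph states j = true ↔ SpecP graph (n + j)) := by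
  induction j with
  | zero =>
    intro n states hs hc
    simp only [pvLoopB, Nat.add_zero, Bool.not_eq_true']
    constructor
    · intro h
      rcases states with _ | ⟨st, rest⟩
      · simp at h
      obtain ⟨s, p, hsk, hch, hnd, hlen, -, -⟩ := hs st (by simp)
      exact ⟨s, p, hsk, hch, hnd, hlen⟩
    · rintro ⟨s, p, hsk, hch, hnd, hlen⟩
      obtain ⟨st, hst, -, -⟩ := hc s p hsk hch hnd hlen
      rcases states with _ | _
      · simp at hst
      · rfl
  | succ j IHj =>
    intro n states hs hc
    rw [pvLoopB]
    split
    · rename_i hemp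
      rw [List.isEmpty_iff] at hemp
      subst hemp
      constructor
      · intro h; simp at h
      · intro h
        exfalso
        have hn : SpecP graph n := SpecP_add_down graph n (j + 1) h
        obtain ⟨s, p, hsk, hch, hnd, hlen⟩ := hn
        obtain ⟨st, hst, -⟩ := hc s p hsk hch hnd hlen
        simp at hst
    · rw [show n + (j + 1) = n + 1 + j by omega]
      exact IHj (n + 1) (pvStepB graph states) (stepB_sound graph n states hs)
        (stepB_compl graph n states hc)

theorem B_iff (graph : List (Int × List Int)) (k : Int) :
    exhaustive_k_path_alt graph k = true ↔ 0 ≤ k ∧ SpecP graph k.toNat := by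
  unfold exhaustive_k_path_alt
  split
  · rename_i hk
    constructor
    · intro h; simp at h
    · rintro ⟨h, -⟩; omega
  · rename_i hk
    have hsound : SoundB graph 0 (PySem.Set.ofList ((pvKeys graph).map (fun v => ([v], v)))) := by
      intro st hst
      rw [PySem.Set.mem_ofList, List.mem_map] at hst
      obtain ⟨v, hv, rfl⟩ := hst
      exact ⟨v, [], hv, by simp, by simp, rfl, by simp, fun x => by simp⟩
    have hcompl : ComplB graph 0 (PySem.Set.ofList ((pvKeys graph).map (fun v => ([v], v)))) := by
      intro s p hsk hch hnd hlen
      rw [List.length_eq_zero_iff] at hlen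
      subst hlen
      refine ⟨([s], s), ?_, by simp, fun x => by simp⟩
      rw [PySem.Set.mem_ofList, List.mem_map]
      exact ⟨s, hsk, rfl⟩
    rw [loopB_iff graph k.toNat 0 _ hsound hcompl]
    simp only [Nat.zero_add]
    exact ⟨fun h => ⟨by omega, h⟩, fun h => h.2⟩

-- ===== VERDICT (by name: the statement is the Claim_ definition above) =====
theorem exhaustive_k_path_spec : Claim_equal_exhaustive_k_path := by
  intro graph k _
  unfold Spec_exhaustive_k_path
  rw [Bool.eq_iff_iff, A_iff, B_iff]
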